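-- pv_equiv track=rewrite | github.com/Spencev/stupidevautour | spencemain.py | generatePercents
-- ===== SOURCE A (Python) =====
-- def generatePercents(playerHand, compHand): #generate the percent matrix to figure out if the participant has a 100 percent chance of wining and at what cards
--     percentMatrix = []
--     for compCard in compHand:#iterate through
--         winCount = 0
--         for playerCard in playerHand:
--             if compCard > playerCard:#winning card
--                 winCount += 1
--         percentMatrix.append(winCount)
--     return percentMatrix
-- ===== SOURCE B (Python) =====
-- def _countBelow(s, x):
--     # index of the left insertion point of x in sorted list s
--     # = number of elements of s strictly below x
--     lo, hi = 0, len(s)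
--     while lo < hi:
--         mid = (lo + hi) // 2
--         if s[mid] < x:
--             lo = mid + 1
--         else:
--             hi = mid
--     return lo
--
-- def generatePercents(playerHand, compHand):
--     # Sort once, then binary-search each comp card: the count of smaller
--     # player cards is the left insertion point in the sorted hand.
--     s = sorted(playerHand)
--     return [_countBelow(s, compCard) for compCard in compHand]
-- ===== Notes on version B (the rewrite author's own statement) =====
-- stated objective: faster
-- what changed: B sorts playerHand once and replaces A's inner linear scan per comp card by a hand-written binary search (bisect_left) for the count of smaller cards.
import Mathlib
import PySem

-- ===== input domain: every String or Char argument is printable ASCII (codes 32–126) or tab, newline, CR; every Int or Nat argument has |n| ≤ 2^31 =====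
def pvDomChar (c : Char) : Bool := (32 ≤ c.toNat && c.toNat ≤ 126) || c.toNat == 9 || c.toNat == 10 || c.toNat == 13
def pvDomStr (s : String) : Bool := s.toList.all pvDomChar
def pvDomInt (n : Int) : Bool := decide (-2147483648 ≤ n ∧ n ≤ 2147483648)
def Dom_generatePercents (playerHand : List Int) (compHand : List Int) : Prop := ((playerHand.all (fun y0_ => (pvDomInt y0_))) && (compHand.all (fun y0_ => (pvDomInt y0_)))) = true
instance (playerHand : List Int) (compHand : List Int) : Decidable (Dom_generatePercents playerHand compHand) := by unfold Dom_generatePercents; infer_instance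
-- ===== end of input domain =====

-- B sorts playerHand once and replaces A's inner linear scan per comp card by a
-- hand-written binary search for the count of strictly smaller cards (objective: faster).

-- ===== PORT A =====
def generatePercents (playerHand : List Int) (compHand : List Int) : List Int :=
  compHand.foldl
    (fun percentMatrix compCard =>
      percentMatrix ++
        [playerHand.foldl
          (fun winCount playerCard => if compCard > playerCard then winCount + 1 else winCount)
          (0 : Int)])
    []

-- ===== PORT B =====
-- the while-loop of Source B's _countBelow, state (lo, hi)
def pvCountBelowLoop (s : List Int) (x : Int) (lo hi : Nat) : Nat :=
  if lo < hi then
    let mid := (lo + hi) / 2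
    if s.getD mid 0 < x then pvCountBelowLoop s x (mid + 1) hi
    else pvCountBelowLoop s x lo mid
  else lo
termination_by hi - lo
decreasing_by all_goals omega

def pvCountBelow (s : List Int) (x : Int) : Nat :=
  pvCountBelowLoop s x 0 s.length

def generatePercents_alt (playerHand : List Int) (compHand : List Int) : List Int :=
  let s := PySem.List.sorted playerHand (fun y => y) false
  compHand.map (fun compCard => (pvCountBelow s compCard : Int))

-- ===== PRECONDITION & SPEC =====
def Spec_generatePercents (playerHand : List Int) (compHand : List Int) (out : List Int) : Prop := out = generatePercents_alt playerHand compHand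
instance (playerHand : List Int) (compHand : List Int) (out : List Int) : Decidable (Spec_generatePercents playerHand compHand out) := by unfold Spec_generatePercents; infer_instance

-- ===== CLAIM (what is proved, stated in full; the proofs are below) =====
def Claim_equal_generatePercents : Prop := ∀ (playerHand : List Int) (compHand : List Int), Dom_generatePercents playerHand compHand → Spec_generatePercents playerHand compHand (generatePercents playerHand compHand)

-- ===== LEMMAS AND PROOFS =====

-- building a list by repeated append is a map
lemma foldl_append_map (l : List Int) (f : Int → Int) (acc : List Int) :
    l.foldl (fun m c => m ++ [f c]) acc = acc ++ l.map f := by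
  induction l generalizing acc with
  | nil => simp
  | cons a t ih => simp [List.foldl_cons, ih]

-- A's inner loop counts the player cards strictly below compCard
lemma inner_foldl_countP (cc : Int) (p : List Int) (a : Int) :
    p.foldl (fun w pc => if cc > pc then w + 1 else w) a
      = a + (p.countP (fun y => decide (y < cc)) : Int) := by
  induction p generalizing a with
  | nil => simp
  | cons b t ih =>
    simp only [List.foldl_cons, List.countP_cons, ih]
    by_cases h : b < cc <;> simp [h, gt_iff_lt] <;> ring

-- on a sorted list, the indices of elements below x form the prefix of length countP
lemma countP_lt_char (x : Int) (s : List Int) (hs : s.Pairwise (· ≤ ·)) :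
    ∀ i (h : i < s.length), (s[i] < x ↔ i < s.countP (fun y => decide (y < x))) := by
  induction s with
  | nil => intro i h; simp at h
  | cons a t ih =>
    rcases List.pairwise_cons.mp hs with ⟨ha, hp⟩
    intro i h
    by_cases hax : a < x
    · cases i with
      | zero => simp [hax]
      | succ j =>
        have hj : j < t.length := by simpa using h
        have hiff := ih hp j hj
        simp only [List.getElem_cons_succ, List.countP_cons, hax, decide_true,
          if_true, hiff]
        omega
    · have ht0 : t.countP (fun y => decide (y < x)) = 0 := by
        apply List.countP_eq_zero.mpr
        intro y hy
        have := ha y hy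
        simp; omega
      cases i with
      | zero => simp [hax, ht0]
      | succ j =>
        have hj : j < t.length := by simpa using h
        have hmem : t[j] ∈ t := List.getElem_mem hj
        have := ha _ hmem
        simp only [List.getElem_cons_succ, List.countP_cons, ht0, hax]
        constructor
        · intro hc; omega
        · intro hc; simp at hc
    
-- the binary search returns C whenever lo ≤ C ≤ hi and C characterises the prefix below x
lemma pvCountBelowLoop_eq (s : List Int) (x : Int) (C : Nat)
    (hchar : ∀ i (h : i < s.length), (s[i] < x ↔ i < C)) :
    ∀ lo hi, hi ≤ s.length → lo ≤ C → C ≤ hi → pvCountBelowLoop s x lo hi = C := by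
  intro lo hi
  induction lo, hi using pvCountBelowLoop.induct s x with
  | case1 lo hi hlt mid hm ih =>
    intro hhi hloC hChi
    have hmidlen : mid < s.length := by omega
    have hget : s.getD mid 0 = s[mid] := List.getD_eq_getElem s 0 hmidlen
    have hmx : s[mid] < x := by rw [← hget]; exact hm
    have hmC : mid < C := (hchar mid hmidlen).mp hmx
    rw [pvCountBelowLoop]
    simp only [hlt, if_true]
    show (if s.getD mid 0 < x then pvCountBelowLoop s x (mid + 1) hi
          else pvCountBelowLoop s x lo mid) = C
    rw [if_pos hm]
    exact ih hhi (by omega) hChi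
  | case2 lo hi hlt mid hm ih =>
    intro hhi hloC hChi
    have hmidlen : mid < s.length := by omega
    have hget : s.getD mid 0 = s[mid] := List.getD_eq_getElem s 0 hmidlen
    have hnot : ¬ s[mid] < x := by rw [← hget]; exact hm
    have hCm : C ≤ mid := by
      have hc := hchar mid hmidlen
      omega
    rw [pvCountBelowLoop]
    simp only [hlt, if_true]
    show (if s.getD mid 0 < x then pvCountBelowLoop s x (mid + 1) hi
          else pvCountBelowLoop s x lo mid) = C
    rw [if_neg hm]
    exact ih (by omega) hloC hCm
  | case3 lo hi hnlt =>
    intro hhi hloC hChi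
    rw [pvCountBelowLoop]
    simp only [hnlt, if_false]
    omega

lemma pvCountBelow_eq_countP (p : List Int) (x : Int) :
    pvCountBelow (PySem.List.sorted p (fun y => y) false) x
      = p.countP (fun y => decide (y < x)) := by
  set s := PySem.List.sorted p (fun y => y) false with hsdef
  have hperm : s.Perm p := PySem.List.sorted_perm p (fun y => y) false
  have hpw : s.Pairwise (· ≤ ·) := by
    have := PySem.List.sorted_pairwise (xs := p) (key := fun y => y)
    simpa [hsdef] using this
  have hcount : s.countP (fun y => decide (y < x)) = p.countP (fun y => decide (y < x)) :=
    hperm.countP_eq _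
  have hchar := countP_lt_char x s hpw
  have hC : s.countP (fun y => decide (y < x)) ≤ s.length := List.countP_le_length
  unfold pvCountBelow
  rw [← hcount]
  exact pvCountBelowLoop_eq s x _ hchar 0 s.length le_rfl (Nat.zero_le _) hC

-- ===== VERDICT (by name: the statement is the Claim_ definition above) =====
theorem generatePercents_spec : Claim_equal_generatePercents := by
  intro playerHand compHand _
  unfold Spec_generatePercents generatePercents generatePercents_alt
  rw [foldl_append_map compHand
      (fun cc => playerHand.foldl (fun w pc => if cc > pc then w + 1 else w) 0) []]
  simp only [List.nil_append]
  apply List.map_congr_left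
  intro cc _
  rw [inner_foldl_countP cc playerHand 0, pvCountBelow_eq_countP]
  simp
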